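-- pv_equiv track=rewrite | github.com/ambroselittle/agent-skills | hooks/PreToolUse/engine/operations/git.py | _extract_git_cwd
-- ===== SOURCE A (Python) =====
-- def _extract_git_cwd(tokens: list[str]) -> str | None:
--     """Extract working directory from -C flag, e.g. git -C /path push ..."""
--     i = 1
--     while i < len(tokens):
--         if tokens[i] == "-C" and i + 1 < len(tokens):
--             return tokens[i + 1]
--         if tokens[i].startswith("-") and not tokens[i].startswith("--"):
--             i += 1
--             continue
--         break
--     return None
-- ===== SOURCE B (Python) =====
-- def _extract_git_cwd(tokens: list[str]) -> str | None:
--     """Extract working directory from -C flag, e.g. git -C /path push ..."""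
--     rest = tokens[1:]
--     try:
--         j = rest.index("-C")
--     except ValueError:
--         return None
--     if j + 1 >= len(rest):
--         return None
--     if all(t.startswith("-") and not t.startswith("--") for t in rest[:j]):
--         return rest[j + 1]
--     return None
-- ===== Notes on version B (the rewrite author's own statement) =====
-- stated objective: alternative
-- what changed: Replaces the incremental while-loop with early return/break by a search-then-validate decomposition: find the first '-C' after argv[0] with list.index, check it has a following token, and verify every token before it is a short flag.
import Mathlib
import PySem

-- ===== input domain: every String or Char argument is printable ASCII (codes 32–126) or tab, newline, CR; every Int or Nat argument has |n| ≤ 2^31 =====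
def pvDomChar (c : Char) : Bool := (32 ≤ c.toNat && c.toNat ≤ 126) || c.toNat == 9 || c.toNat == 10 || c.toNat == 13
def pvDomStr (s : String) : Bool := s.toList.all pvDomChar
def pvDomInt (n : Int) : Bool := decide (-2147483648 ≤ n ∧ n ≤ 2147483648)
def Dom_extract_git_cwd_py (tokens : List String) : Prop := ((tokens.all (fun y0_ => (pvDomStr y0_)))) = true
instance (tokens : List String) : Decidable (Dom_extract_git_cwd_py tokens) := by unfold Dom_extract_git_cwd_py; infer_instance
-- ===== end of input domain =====

-- B replaces A's incremental while-loop (advance over short flags, break otherwise) by a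
-- search-then-validate decomposition (find first '-C', then validate the prefix); same cost,
-- equivalence proved for the RETURN value on all inputs.

-- ===== PORT A =====
-- A's while loop over index i (i = 1 initially); recursion on the remaining length.
def extract_git_cwd_py_go (tokens : List String) (i : Nat) : Option String :=
  if h : i < tokens.length then
    if tokens[i] = "-C" ∧ i + 1 < tokens.length then
      some (tokens.getD (i + 1) "")
    else if PySem.Str.startswith tokens[i] "-" && !(PySem.Str.startswith tokens[i] "--") then
      extract_git_cwd_py_go tokens (i + 1)
    else none
  else none
termination_by tokens.length - i

def extract_git_cwd_py (tokens : List String) : Option String :=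
  extract_git_cwd_py_go tokens 1

-- ===== PORT B =====
-- Source B: rest = tokens[1:]; j = rest.index("-C") (None if absent); bound check; validate rest[:j];
-- return rest[j+1].  (Indices on `rest` are always in range when used, so getD is exact.)
def extract_git_cwd_py_alt (tokens : List String) : Option String :=
  let rest := tokens.drop 1
  match PySem.List.index? rest "-C" with
  | none => none
  | some j =>
    if j + 1 ≥ rest.length then none
    else if (rest.take j).all
        (fun t => PySem.Str.startswith t "-" && !(PySem.Str.startswith t "--")) then
      some (rest.getD (j + 1) "")
    else none

-- ===== PRECONDITION & SPEC =====
def Spec_extract_git_cwd_py (tokens : List String) (out : Option String) : Prop := out = extract_git_cwd_py_alt tokens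
instance (tokens : List String) (out : Option String) : Decidable (Spec_extract_git_cwd_py tokens out) := by unfold Spec_extract_git_cwd_py; infer_instance

-- ===== CLAIM (what is proved, stated in full; the proofs are below) =====
def Claim_equal_extract_git_cwd_py : Prop := ∀ (tokens : List String), Dom_extract_git_cwd_py tokens → Spec_extract_git_cwd_py tokens (extract_git_cwd_py tokens)

-- ===== LEMMAS AND PROOFS =====

-- B's body as a function of the suffix rest = tokens.drop 1.
def pvAltBody (rest : List String) : Option String :=
  match PySem.List.index? rest "-C" with
  | none => none
  | some j =>
    if j + 1 ≥ rest.length then none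
    else if (rest.take j).all
        (fun t => PySem.Str.startswith t "-" && !(PySem.Str.startswith t "--")) then
      some (rest.getD (j + 1) "")
    else none

lemma alt_eq_body (tokens : List String) :
    extract_git_cwd_py_alt tokens = pvAltBody (tokens.drop 1) := rfl

lemma body_cons_short (t : String) (r : List String) (ht : t ≠ "-C")
    (hs : (PySem.Str.startswith t "-" && !(PySem.Str.startswith t "--")) = true) :
    pvAltBody (t :: r) = pvAltBody r := by
  unfold pvAltBody
  rw [PySem.List.index?_cons_of_ne r ht]
  cases hidx : PySem.List.index? r "-C" with
  | none => simp
  | some j =>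
    simp only [Option.map_some]
    by_cases hb : j + 1 ≥ r.length
    · rw [if_pos (by simp only [List.length_cons]; omega), if_pos hb]
    · rw [if_neg (by simp only [List.length_cons]; omega), if_neg hb]
      simp only [List.take_succ_cons, List.all_cons, hs, Bool.true_and]
      by_cases ha : ((List.take j r).all
          fun t => PySem.Str.startswith t "-" && !PySem.Str.startswith t "--") = true
      · rw [if_pos ha, if_pos ha]
        simp [List.getD]
      · rw [if_neg ha, if_neg ha]

lemma body_cons_break (t : String) (r : List String) (ht : t ≠ "-C")
    (hs : ¬ (PySem.Str.startswith t "-" && !(PySem.Str.startswith t "--")) = true) :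
    pvAltBody (t :: r) = none := by
  unfold pvAltBody
  rw [PySem.List.index?_cons_of_ne r ht]
  cases hidx : PySem.List.index? r "-C" with
  | none => simp
  | some j =>
    simp only [Option.map_some]
    by_cases hb : j + 1 + 1 ≥ (t :: r).length
    · rw [if_pos hb]
    · rw [if_neg hb]
      rw [if_neg (by
        intro hall
        simp only [List.take_succ_cons, List.all_cons, Bool.and_eq_true] at hall
        exact hs ((Bool.and_eq_true _ _).mpr hall.1))]

lemma go_eq_body (tokens : List String) (i : Nat) :
    extract_git_cwd_py_go tokens i = pvAltBody (tokens.drop i) := by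
  by_cases h : i < tokens.length
  · have hdrop : tokens.drop i = tokens[i] :: tokens.drop (i + 1) :=
      List.drop_eq_getElem_cons h
    rw [extract_git_cwd_py_go, dif_pos h, hdrop]
    set t := tokens[i] with ht
    by_cases hC : t = "-C"
    · by_cases hnext : i + 1 < tokens.length
      · rw [if_pos ⟨hC, hnext⟩]
        unfold pvAltBody
        rw [hC, PySem.List.index?_cons_self]
        simp only []
        rw [if_neg (by simp [List.length_drop]; omega : ¬ (0 + 1 ≥ (("-C" : String) :: tokens.drop (i + 1)).length))]
        simp [List.getD, List.getElem?_drop]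
      · rw [if_neg (by tauto)]
        have hshort : (PySem.Str.startswith t "-" && !(PySem.Str.startswith t "--")) = true := by
          rw [hC]; decide
        rw [if_pos hshort]
        have hr : tokens.drop (i + 1) = [] := List.drop_eq_nil_of_le (by omega)
        have : extract_git_cwd_py_go tokens (i + 1) = pvAltBody (tokens.drop (i + 1)) := by
          rw [extract_git_cwd_py_go, dif_neg (by omega : ¬ i + 1 < tokens.length), hr]
          unfold pvAltBody; simp [PySem.List.index?]
        rw [this, hr, hC]
        unfold pvAltBody
        rw [PySem.List.index?_cons_self]
        simp [PySem.List.index?]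
    · rw [if_neg (by tauto)]
      by_cases hs : (PySem.Str.startswith t "-" && !(PySem.Str.startswith t "--")) = true
      · rw [if_pos hs, go_eq_body tokens (i + 1), body_cons_short t _ hC hs]
      · rw [if_neg hs, body_cons_break t _ hC hs]
  · rw [extract_git_cwd_py_go, dif_neg h,
        List.drop_eq_nil_of_le (by omega : tokens.length ≤ i)]
    unfold pvAltBody; simp [PySem.List.index?]
termination_by tokens.length - i
decreasing_by omega

-- ===== VERDICT (by name: the statement is the Claim_ definition above) =====
theorem extract_git_cwd_py_spec : Claim_equal_extract_git_cwd_py := by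
  intro tokens _
  unfold Spec_extract_git_cwd_py extract_git_cwd_py
  rw [go_eq_body, alt_eq_body]
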